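-- pv_equiv track=rewrite | github.com/acabelloj/gh-inspector | gh_inspector/src/commands/find_python_version/__init__.py | _project_key
-- ===== SOURCE A (Python) =====
-- _ROOT_DIRS = {".github", ".circleci"}
--
-- def _project_key(file_path: str, project_roots: set[str]) -> str:
--     """Return the sub-project key for a file based on detected project roots.
--
--     Finds the deepest project root directory that is an ancestor of the file.
--     CI dirs (.github, .circleci) always belong to the root project.
--     Falls back to the first directory component for unmatched files.
--     """
--     parts = file_path.split("/")
--     if parts[0] in _ROOT_DIRS:
--         return ""
--     file_dir = "/".join(parts[:-1])
--     best: str | None = None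
--     for root in project_roots:
--         if root == "" or file_dir == root or file_dir.startswith(root + "/"):
--             if best is None or len(root) > len(best):
--                 best = root
--     if best is not None:
--         return best
--     return parts[0] if len(parts) > 1 else ""
-- ===== SOURCE B (Python) =====
-- _ROOT_DIRS = {".github", ".circleci"}
--
-- def _project_key(file_path: str, project_roots: set[str]) -> str:
--     """Deepest-first scan of slash-boundary prefixes of the file's directory,
--     checked against the roots set: O(D*L) instead of O(R*L)."""
--     parts = file_path.split("/")
--     if parts[0] in _ROOT_DIRS:
--         return ""
--     file_dir = "/".join(parts[:-1])
--     for k in range(len(file_dir), -1, -1):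
--         if (k == len(file_dir) or file_dir[k] == "/") and file_dir[:k] in project_roots:
--             return file_dir[:k]
--     if "" in project_roots:
--         return ""
--     return parts[0] if len(parts) > 1 else ""
-- ===== Notes on version B (the rewrite author's own statement) =====
-- stated objective: faster
-- what changed: A scans every project root and keeps the longest one that is an ancestor of the file's directory (O(R*L)); B instead walks the slash-boundary prefixes of the file's directory from deepest to shallowest and returns the first one found in the roots set (O(D*L), independent of the number of roots).
import Mathlib
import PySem

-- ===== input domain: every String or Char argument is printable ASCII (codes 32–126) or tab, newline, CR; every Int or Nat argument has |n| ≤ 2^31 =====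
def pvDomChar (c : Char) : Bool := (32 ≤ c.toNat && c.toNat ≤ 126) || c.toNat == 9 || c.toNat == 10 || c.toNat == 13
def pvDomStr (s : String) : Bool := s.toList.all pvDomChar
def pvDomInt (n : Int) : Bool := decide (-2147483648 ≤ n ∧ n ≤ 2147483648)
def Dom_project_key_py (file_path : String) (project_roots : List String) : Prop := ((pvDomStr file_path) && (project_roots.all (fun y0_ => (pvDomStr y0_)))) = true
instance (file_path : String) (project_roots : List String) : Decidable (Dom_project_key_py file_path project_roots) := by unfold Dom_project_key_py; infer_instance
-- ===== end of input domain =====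

-- B replaces A's scan over every root (keeping the longest match) with a deepest-first scan over the
-- slash-boundary prefixes of the file's directory, returning the first prefix that is in the roots set.

-- ===== PORT A =====
-- module constant _ROOT_DIRS = {".github", ".circleci"}
def pvRootDirs : PySem.Set String := PySem.Set.ofList [".github", ".circleci"]

-- the loop's match test: root == "" or file_dir == root or file_dir.startswith(root + "/")
def pvMatchA (file_dir root : String) : Bool :=
  root == "" || file_dir == root || PySem.Str.startswith file_dir (root ++ "/")

-- one iteration of A's 'for root in project_roots' loop body
def pvStepA (file_dir : String) (best : Option String) (root : String) : Option String :=
  if pvMatchA file_dir root then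
    match best with
    | none => some root
    | some b => if PySem.Str.len root > PySem.Str.len b then some root else best
  else best

def project_key_py (file_path : String) (project_roots : List String) : String :=
  let parts := (PySem.Str.split? file_path "/").getD []   -- sep "/" ≠ "": split? is never none
  if pvRootDirs.contains (PySem.List.pyGetD parts 0 "") then ""   -- parts[0]: split is never empty, no IndexError
  else
    let file_dir := PySem.Str.join "/" (PySem.List.slice parts none (some (-1)))
    match project_roots.foldl (pvStepA file_dir) none with
    | some best => best
    | none => if parts.length > 1 then PySem.List.pyGetD parts 0 "" else ""

-- ===== PORT B =====
-- loop body test: (k == len(file_dir) or file_dir[k] == "/") and file_dir[:k] in project_roots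
def pvCondB (file_dir : String) (project_roots : List String) (k : Int) : Bool :=
  (k == PySem.Str.len file_dir || PySem.Str.pyGet? file_dir k == some '/') &&
    project_roots.contains (PySem.Str.slice file_dir none (some k))

-- the body of 'for k in range(len(file_dir), -1, -1)' with its early return
def pvLoopB (file_dir : String) (project_roots : List String) : List Int → Option String
  | [] => none
  | k :: rest =>
      if pvCondB file_dir project_roots k then some (PySem.Str.slice file_dir none (some k))
      else pvLoopB file_dir project_roots rest

-- the loop itself, over range(len(file_dir), -1, -1)
def pvScanB (file_dir : String) (project_roots : List String) : Option String :=
  pvLoopB file_dir project_roots (PySem.List.pyRange (PySem.Str.len file_dir) (-1) (-1))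

def project_key_py_alt (file_path : String) (project_roots : List String) : String :=
  let parts := (PySem.Str.split? file_path "/").getD []   -- sep "/" ≠ "": split? is never none
  if pvRootDirs.contains (PySem.List.pyGetD parts 0 "") then ""   -- parts[0]: split is never empty, no IndexError
  else
    let file_dir := PySem.Str.join "/" (PySem.List.slice parts none (some (-1)))
    match pvScanB file_dir project_roots with
    | some c => c
    | none =>
        if project_roots.contains "" then ""
        else if parts.length > 1 then PySem.List.pyGetD parts 0 "" else ""

-- ===== PRECONDITION & SPEC =====
def Spec_project_key_py (file_path : String) (project_roots : List String) (out : String) : Prop := out = project_key_py_alt file_path project_roots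
instance (file_path : String) (project_roots : List String) (out : String) : Decidable (Spec_project_key_py file_path project_roots out) := by unfold Spec_project_key_py; infer_instance

-- ===== CLAIM (what is proved, stated in full; the proofs are below) =====
def Claim_equal_project_key_py : Prop := ∀ (file_path : String) (project_roots : List String), Dom_project_key_py file_path project_roots → Spec_project_key_py file_path project_roots (project_key_py file_path project_roots)

-- ===== LEMMAS AND PROOFS =====

-- bridges to List Char
theorem pvLen_eq (fd : String) : PySem.Str.len fd = (fd.toList.length : Int) := by
  simp [pysem]

theorem pvSlice_toList (fd : String) (k : Nat) :
    (PySem.Str.slice fd none (some (k : Int))).toList = fd.toList.take k := by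
  simp [pysem, PySem.List.slice_to _ (by positivity : (0:Int) ≤ (k:Int))]

-- a root matches A's test iff it is "" or a slash-boundary prefix of file_dir
theorem pvMatchA_iff (fd r : String) :
    pvMatchA fd r = true ↔
      r = "" ∨ ∃ k : Nat, k ≤ fd.toList.length ∧
        (k = fd.toList.length ∨ fd.toList[k]? = some '/') ∧ r.toList = fd.toList.take k := by
  unfold pvMatchA
  simp only [Bool.or_eq_true, beq_iff_eq]
  constructor
  · rintro ((h | h) | h)
    · exact Or.inl h
    · refine Or.inr ⟨fd.toList.length, le_rfl, Or.inl rfl, ?_⟩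
      rw [← h, List.take_length]
    · have hpre : (r ++ "/").toList <+: fd.toList := by
        rw [PySem.Str.startswith_eq, PySem.Chars.startswith_iff] at h
        exact h
      rw [String.toList_append] at hpre
      obtain ⟨t, ht⟩ := hpre
      have ht' : r.toList ++ '/' :: t = fd.toList := by simpa using ht
      have hlen : (r.toList ++ '/' :: t).length = fd.toList.length := by rw [ht']
      simp only [List.length_append, List.length_cons] at hlen
      refine Or.inr ⟨r.toList.length, by omega, Or.inr ?_, ?_⟩
      · rw [← ht', List.getElem?_append_right (le_refl _)]
        simp
      · rw [← ht']
        exact List.take_left.symm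
  · rintro (rfl | ⟨k, hk, hb, ht⟩)
    · exact Or.inl (Or.inl rfl)
    · by_cases hkn : k = fd.toList.length
      · refine Or.inl (Or.inr ?_)
        apply String.toList_inj.mp
        rw [ht, hkn, List.take_length]
      · have hk' : k < fd.toList.length := lt_of_le_of_ne hk hkn
        rcases hb with h | h
        · exact absurd h hkn
        · refine Or.inr ?_
          rw [PySem.Str.startswith_eq, PySem.Chars.startswith_iff]
          have h2 : r.toList ++ ['/'] = fd.toList.take (k + 1) := by
            rw [ht, List.take_add_one, h]
            rfl
          have : (r ++ "/").toList = fd.toList.take (k + 1) := by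
            rw [String.toList_append, ← h2]; rfl
          rw [this]
          exact List.take_prefix _ _

-- characterisation of A's fold: its result bounds every match from above and is itself a match
theorem pvFoldA_spec (fd : String) (rs : List String) (acc : Option String) :
    (rs.foldl (pvStepA fd) acc = acc ∨
      ∃ b ∈ rs, rs.foldl (pvStepA fd) acc = some b ∧ pvMatchA fd b = true) ∧
    (∀ r ∈ rs, pvMatchA fd r = true →
      ∃ b, rs.foldl (pvStepA fd) acc = some b ∧ PySem.Str.len r ≤ PySem.Str.len b) ∧
    (∀ a, acc = some a →
      ∃ b, rs.foldl (pvStepA fd) acc = some b ∧ PySem.Str.len a ≤ PySem.Str.len b) := by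
  induction rs generalizing acc with
  | nil =>
      refine ⟨Or.inl rfl, by simp, ?_⟩
      intro a ha; exact ⟨a, by simpa using ha, le_rfl⟩
  | cons r rs ih =>
      simp only [List.foldl_cons]
      obtain ⟨ih1, ih2, ih3⟩ := ih (pvStepA fd acc r)
      have hstep : (pvStepA fd acc r = acc ∧ pvMatchA fd r = false) ∨
          (pvMatchA fd r = true ∧ ∃ a, pvStepA fd acc r = some a ∧
            PySem.Str.len r ≤ PySem.Str.len a ∧
            (∀ a0, acc = some a0 → PySem.Str.len a0 ≤ PySem.Str.len a) ∧
            (a = r ∨ acc = some a)) := by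
        by_cases hm : pvMatchA fd r = true
        · right
          refine ⟨hm, ?_⟩
          cases acc with
          | none =>
              refine ⟨r, ?_, le_rfl, by simp, Or.inl rfl⟩
              show pvStepA fd none r = some r
              unfold pvStepA
              rw [if_pos hm]
          | some b =>
              by_cases hgt : PySem.Str.len r > PySem.Str.len b
              · refine ⟨r, ?_, le_rfl, ?_, Or.inl rfl⟩
                · show pvStepA fd (some b) r = some r
                  unfold pvStepA
                  rw [if_pos hm]
                  exact if_pos hgt
                · intro a0 h0; injection h0 with h0; subst h0; omega
              · refine ⟨b, ?_, by omega, ?_, Or.inr rfl⟩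
                · show pvStepA fd (some b) r = some b
                  unfold pvStepA
                  rw [if_pos hm]
                  exact if_neg hgt
                · intro a0 h0; injection h0 with h0; subst h0; omega
        · left
          simp only [Bool.not_eq_true] at hm
          refine ⟨?_, hm⟩
          unfold pvStepA
          rw [hm]
          simp
      refine ⟨?_, ?_, ?_⟩
      · rcases ih1 with h1 | ⟨b, hbm, hbe, hbma⟩
        · rcases hstep with ⟨he, _⟩ | ⟨hm, a, ha, _, _, hor⟩
          · rw [h1, he]; exact Or.inl rfl
          · rcases hor with rfl | hacc
            · exact Or.inr ⟨a, List.mem_cons_self, by rw [h1, ha], hm⟩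
            · rw [h1, ha, ← hacc]; exact Or.inl rfl
        · exact Or.inr ⟨b, List.mem_cons_of_mem _ hbm, hbe, hbma⟩
      · intro x hx hmx
        rcases List.mem_cons.mp hx with rfl | hx'
        · rcases hstep with ⟨_, hf⟩ | ⟨_, a, ha, hra, _, _⟩
          · rw [hmx] at hf; cases hf
          · obtain ⟨b, hbe, hab⟩ := ih3 a ha
            exact ⟨b, hbe, le_trans hra hab⟩
        · exact ih2 x hx' hmx
      · intro a0 h0
        rcases hstep with ⟨he, _⟩ | ⟨_, a, ha, _, hmono, _⟩
        · exact ih3 a0 (by rw [he, h0])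
        · obtain ⟨b, hbe, hab⟩ := ih3 a ha
          exact ⟨b, hbe, le_trans (hmono a0 h0) hab⟩

-- B's loop returns none iff no index passes the test
theorem pvLoopB_none_iff (fd : String) (rs : List String) (ks : List Int) :
    pvLoopB fd rs ks = none ↔ ∀ k ∈ ks, pvCondB fd rs k = false := by
  induction ks with
  | nil => simp [pvLoopB]
  | cons k rest ih =>
      unfold pvLoopB
      by_cases h : pvCondB fd rs k = true
      · simp [h]
      · simp only [Bool.not_eq_true] at h
        simp [h, ih]

-- B's loop returns the first passing index's prefix
theorem pvLoopB_some (fd : String) (rs : List String) (ks : List Int) (c : String)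
    (h : pvLoopB fd rs ks = some c) :
    ∃ pre k post, ks = pre ++ k :: post ∧ pvCondB fd rs k = true ∧
      c = PySem.Str.slice fd none (some k) ∧ ∀ k' ∈ pre, pvCondB fd rs k' = false := by
  induction ks with
  | nil => simp [pvLoopB] at h
  | cons k rest ih =>
      unfold pvLoopB at h
      by_cases hc : pvCondB fd rs k = true
      · rw [if_pos hc] at h
        exact ⟨[], k, rest, rfl, hc, (Option.some_injective _ h).symm, by simp⟩
      · rw [if_neg hc] at h
        obtain ⟨pre, k', post, hks, h1, h2, h3⟩ := ih h
        refine ⟨k :: pre, k', post, by rw [hks]; rfl, h1, h2, ?_⟩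
        intro x hx
        rcases List.mem_cons.mp hx with rfl | hx'
        · exact Bool.not_eq_true _ ▸ (by simpa using hc)
        · exact h3 x hx'

-- the test at a Nat index, in boundary/membership form
theorem pvCondB_iff (fd : String) (rs : List String) (k : Nat) :
    pvCondB fd rs (k : Int) = true ↔
      ((k = fd.toList.length ∨ fd.toList[k]? = some '/') ∧
        PySem.Str.slice fd none (some (k : Int)) ∈ rs) := by
  unfold pvCondB
  simp [pysem, PySem.List.pyGet?_of_nonneg _ (by positivity : (0 : Int) ≤ (k : Int))]

-- a boundary prefix that is in rs makes the test pass
theorem pvCondB_of_boundary (fd : String) (rs : List String) (k : Nat) (b : String)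
    (hb : k = fd.toList.length ∨ fd.toList[k]? = some '/')
    (hbt : b.toList = fd.toList.take k) (hmem : b ∈ rs) :
    pvCondB fd rs (k : Int) = true ∧ b = PySem.Str.slice fd none (some (k : Int)) := by
  have hsl : b = PySem.Str.slice fd none (some (k : Int)) := by
    apply String.toList_inj.mp
    rw [hbt, pvSlice_toList]
  exact ⟨(pvCondB_iff fd rs k).mpr ⟨hb, hsl ▸ hmem⟩, hsl⟩

-- scan = none: no boundary index passes
theorem pvScanB_none (fd : String) (rs : List String) (h : pvScanB fd rs = none) :
    ∀ k : Nat, k ≤ fd.toList.length → pvCondB fd rs (k : Int) = false := by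
  intro k hk
  refine (pvLoopB_none_iff fd rs _).mp h (k : Int) ?_
  rw [PySem.List.mem_pyRange_neg_one, pvLen_eq]
  constructor <;> omega

-- scan = some c: c is the deepest passing boundary prefix
theorem pvScanB_some (fd : String) (rs : List String) (c : String) (h : pvScanB fd rs = some c) :
    ∃ k : Nat, k ≤ fd.toList.length ∧ pvCondB fd rs (k : Int) = true ∧
      c = PySem.Str.slice fd none (some (k : Int)) ∧
      ∀ k' : Nat, k' ≤ fd.toList.length → pvCondB fd rs (k' : Int) = true → k' ≤ k := by
  obtain ⟨pre, k, post, hks, hcond, hc, hpre⟩ := pvLoopB_some fd rs _ c h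
  have hpw : (PySem.List.pyRange (PySem.Str.len fd) (-1) (-1)).Pairwise (· > ·) := by
    rw [PySem.List.pyRange_neg_one_eq_reverse, List.pairwise_reverse]
    exact PySem.List.pairwise_lt_pyRange_one _ _
  have hmemk : k ∈ PySem.List.pyRange (PySem.Str.len fd) (-1) (-1) := by
    rw [hks]; exact List.mem_append_right _ (List.mem_cons_self)
  have hkrange := PySem.List.mem_pyRange_neg_one.mp hmemk
  rw [pvLen_eq] at hkrange
  have hk0 : 0 ≤ k := by omega
  refine ⟨k.toNat, by omega, by rwa [Int.toNat_of_nonneg hk0], by rwa [Int.toNat_of_nonneg hk0], ?_⟩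
  intro k' hk' hcond'
  have hmem' : (k' : Int) ∈ PySem.List.pyRange (PySem.Str.len fd) (-1) (-1) := by
    rw [PySem.List.mem_pyRange_neg_one, pvLen_eq]
    constructor <;> omega
  rw [hks] at hmem' hpw
  rcases List.mem_append.mp hmem' with hx | hx
  · rw [hpre _ hx] at hcond'; cases hcond'
  · rcases List.mem_cons.mp hx with he | hx'
    · omega
    · have := (List.pairwise_append.mp hpw).2.1
      have := (List.pairwise_cons.mp this).1 _ hx'
      omega

-- lengths of matched strings
theorem pvLen_take (fd : String) (k : Nat) (hk : k ≤ fd.toList.length) (b : String)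
    (hb : b.toList = fd.toList.take k) : PySem.Str.len b = (k : Int) := by
  rw [pvLen_eq, hb, List.length_take]
  omega

-- the shared core, split three ways on B's scan result
theorem pvB_some (fd : String) (rs : List String) (c : String) (h : pvScanB fd rs = some c) :
    rs.foldl (pvStepA fd) none = some c := by
  obtain ⟨k, hk, hcond, hc, hmax⟩ := pvScanB_some fd rs c h
  obtain ⟨hb, hmem⟩ := (pvCondB_iff fd rs k).mp hcond
  rw [← hc] at hmem
  have hct : c.toList = fd.toList.take k := by rw [hc, pvSlice_toList]
  have hmc : pvMatchA fd c = true := (pvMatchA_iff fd c).mpr (Or.inr ⟨k, hk, hb, hct⟩)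
  obtain ⟨h1, h2, _⟩ := pvFoldA_spec fd rs none
  obtain ⟨b, hbe, hcb⟩ := h2 c hmem hmc
  rcases h1 with h1 | ⟨b', hb'm, hb'e, hb'ma⟩
  · rw [h1] at hbe; cases hbe
  · rw [hbe] at hb'e
    have hbb' : b' = b := (Option.some_injective _ hb'e).symm
    subst hbb'
    rcases (pvMatchA_iff fd b').mp hb'ma with rfl | ⟨kb, hkb, hbb, hbt⟩
    · -- b' = "": c has length ≤ 0, so c = ""
      have hlc : PySem.Str.len c = (k : Int) := pvLen_take fd k hk c hct
      have : PySem.Str.len ("" : String) = (0 : Int) := by rw [pvLen_eq]; rfl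
      have hk0 : k = 0 := by omega
      rw [hbe]
      congr 1
      apply String.toList_inj.mp
      rw [hct, hk0]
      rfl
    · -- b' is a boundary prefix: it passes the test, so kb ≤ k, and len c ≤ len b' gives k ≤ kb
      obtain ⟨hcnd', _⟩ := pvCondB_of_boundary fd rs kb b' hbb hbt hb'm
      have hkbk : kb ≤ k := hmax kb hkb hcnd'
      have hlc : PySem.Str.len c = (k : Int) := pvLen_take fd k hk c hct
      have hlb : PySem.Str.len b' = (kb : Int) := pvLen_take fd kb hkb b' hbt
      have : k = kb := by omega
      rw [hbe]
      congr 1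
      apply String.toList_inj.mp
      rw [hbt, hct, this]

theorem pvB_none_pos (fd : String) (rs : List String) (h : pvScanB fd rs = none)
    (hc : rs.contains "" = true) : rs.foldl (pvStepA fd) none = some "" := by
  have hmem : ("" : String) ∈ rs := List.contains_iff_mem.mp hc
  have hme : pvMatchA fd "" = true := (pvMatchA_iff fd "").mpr (Or.inl rfl)
  obtain ⟨h1, h2, _⟩ := pvFoldA_spec fd rs none
  obtain ⟨b, hbe, _⟩ := h2 "" hmem hme
  rcases h1 with h1 | ⟨b', hb'm, hb'e, hb'ma⟩
  · rw [h1] at hbe; cases hbe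
  · rw [hbe] at hb'e
    have : b' = b := (Option.some_injective _ hb'e).symm
    subst this
    rcases (pvMatchA_iff fd b').mp hb'ma with rfl | ⟨kb, hkb, hbb, hbt⟩
    · exact hbe
    · obtain ⟨hcnd', _⟩ := pvCondB_of_boundary fd rs kb b' hbb hbt hb'm
      rw [pvScanB_none fd rs h kb hkb] at hcnd'
      cases hcnd'

theorem pvB_none_neg (fd : String) (rs : List String) (h : pvScanB fd rs = none)
    (hc : rs.contains "" = false) : rs.foldl (pvStepA fd) none = none := by
  obtain ⟨h1, _, _⟩ := pvFoldA_spec fd rs none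
  rcases h1 with h1 | ⟨b, hbm, hbe, hbma⟩
  · exact h1
  · exfalso
    rcases (pvMatchA_iff fd b).mp hbma with rfl | ⟨kb, hkb, hbb, hbt⟩
    · rw [List.contains_iff_mem.mpr hbm] at hc; cases hc
    · obtain ⟨hcnd', _⟩ := pvCondB_of_boundary fd rs kb b hbb hbt hbm
      rw [pvScanB_none fd rs h kb hkb] at hcnd'
      cases hcnd'

-- ===== VERDICT (by name: the statement is the Claim_ definition above) =====
theorem project_key_py_spec : Claim_equal_project_key_py := by
  intro file_path project_roots _
  show project_key_py file_path project_roots = project_key_py_alt file_path project_roots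
  unfold project_key_py project_key_py_alt
  by_cases h : pvRootDirs.contains (PySem.List.pyGetD ((PySem.Str.split? file_path "/").getD []) 0 "") = true
  · simp only [h, if_true]
  · simp only [h]
    set fd := PySem.Str.join "/" (PySem.List.slice ((PySem.Str.split? file_path "/").getD []) none (some (-1))) with hfd
    cases hB : pvScanB fd project_roots with
    | some c => rw [pvB_some fd project_roots c hB]
    | none =>
        cases hc : project_roots.contains "" with
        | true => rw [pvB_none_pos fd project_roots hB hc]; simp
        | false => rw [pvB_none_neg fd project_roots hB hc]; simp
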